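-- pv_equiv track=rewrite | github.com/sositon/Intro2CS | Ex_6/wave_editor.py | sound_dim
-- ===== SOURCE A (Python) =====
-- LEFT_CHANNEL = 0
--
-- RIGHT_CHANNEL = 1
--
-- def average(a, b, c=None):
--     """
--     :return: the int average of 2 or 3 numbers
--     """
--     if c is None:
--         return int((a + b) / 2)
--     return int((a + b + c) / 3)
--
-- def sound_dim(data_list):
--     """
--     :param data_list: list of lists holds the audio data
--     :return: the dimmed audio data based on the average of 3 adjacent cells
--     """
--     result_list = []
--     last_i = len(data_list) - 1
--     for i in range(len(data_list)):
--         # First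
--         if i == 0:
--             # len = 1
--             if i == last_i:
--                 return data_list
--             x = average(data_list[i][LEFT_CHANNEL],
--                         data_list[i + 1][LEFT_CHANNEL])
--             y = average(data_list[i][RIGHT_CHANNEL],
--                         data_list[i + 1][RIGHT_CHANNEL])
--         # Last
--         elif i == last_i:
--             x = average(data_list[last_i - 1][LEFT_CHANNEL],
--                         data_list[last_i][LEFT_CHANNEL])
--             y = average(data_list[last_i - 1][RIGHT_CHANNEL],
--                         data_list[last_i][RIGHT_CHANNEL])
--         else:
--             x = average(data_list[i - 1][LEFT_CHANNEL],
--                         data_list[i][LEFT_CHANNEL],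
--                         data_list[i + 1][LEFT_CHANNEL])
--             y = average(data_list[i - 1][RIGHT_CHANNEL],
--                         data_list[i][RIGHT_CHANNEL],
--                         data_list[i + 1][RIGHT_CHANNEL])
--         result_list.append([x, y])
--     return result_list
-- ===== SOURCE B (Python) =====
-- def _trunc_div(s, k):
--     """Truncating division toward zero, exact for any int (matches int(s/k))."""
--     return -((-s) // k) if s < 0 else s // k
--
--
-- def sound_dim(data_list):
--     """Dim audio via per-channel prefix sums: each output cell i is the
--     truncated mean of the window [max(0,i-1), min(n,i+2)) of its channel."""
--     n = len(data_list)
--     if n <= 1: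
--         return data_list if data_list else []
--     channels = []
--     for ch in range(2):
--         col = [row[ch] for row in data_list]
--         prefix = [0]
--         for v in col:
--             prefix.append(prefix[-1] + v)
--         smoothed = []
--         for i in range(n):
--             lo = max(0, i - 1)
--             hi = min(n, i + 2)
--             smoothed.append(_trunc_div(prefix[hi] - prefix[lo], hi - lo))
--         channels.append(smoothed)
--     return [list(pair) for pair in zip(*channels)]
-- ===== Notes on version B (the rewrite author's own statement) =====
-- stated objective: alternative
-- what changed: Replaces A's single row-wise indexed loop with a per-index three-way branch and a 2/3-argument average helper by a column-wise algorithm: each channel is extracted, a prefix-sum list is built once, and every output value is one uniform truncated-mean of the sliding window [max(0,i-1), min(n,i+2)) computed from two prefix-sum lookups; rows are re-assembled by zipping the two smoothed channels.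
import Mathlib
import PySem

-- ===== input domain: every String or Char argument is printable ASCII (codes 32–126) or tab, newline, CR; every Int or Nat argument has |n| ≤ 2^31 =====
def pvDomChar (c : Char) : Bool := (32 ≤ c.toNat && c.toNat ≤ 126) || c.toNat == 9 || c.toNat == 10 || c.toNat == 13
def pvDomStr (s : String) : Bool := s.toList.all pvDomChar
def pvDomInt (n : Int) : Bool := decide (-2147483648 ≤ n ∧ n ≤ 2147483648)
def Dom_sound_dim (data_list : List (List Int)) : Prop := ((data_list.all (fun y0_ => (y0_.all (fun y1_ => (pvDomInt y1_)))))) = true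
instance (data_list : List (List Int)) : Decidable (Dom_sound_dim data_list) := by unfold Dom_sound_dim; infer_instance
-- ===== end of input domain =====

-- B replaces A's branching indexed loop and 2/3-argument average helper by a
-- column-wise algorithm: per-channel prefix sums and one uniform sliding-window
-- formula (truncated mean of window [max(0,i-1), min(n,i+2))) (alternative, not faster).

-- ===== PORT A =====
def LEFT_CHANNEL : Int := 0
def RIGHT_CHANNEL : Int := 1

-- int((a+b)/2) / int((a+b+c)/3): Python float division then int() truncates toward
-- zero; exact as integer truncating division for |sum| < 2^53, which Dom guarantees.
def average (a b : Int) (c : Option Int) : Int :=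
  match c with
  | none => PySem.Int.truncdiv (a + b) 2
  | some c => PySem.Int.truncdiv (a + b + c) 3

-- the for-loop of A, with the in-loop early return kept in place
def soundDimLoop (data_list : List (List Int)) (last_i : Int) :
    List Int → List (List Int) → List (List Int)
  | [], acc => acc
  | i :: rest, acc =>
    if i = 0 then
      if i = last_i then data_list
      else
        let x := average (PySem.List.pyGetD (PySem.List.pyGetD data_list i []) LEFT_CHANNEL 0)
                         (PySem.List.pyGetD (PySem.List.pyGetD data_list (i + 1) []) LEFT_CHANNEL 0) none
        let y := average (PySem.List.pyGetD (PySem.List.pyGetD data_list i []) RIGHT_CHANNEL 0)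
                         (PySem.List.pyGetD (PySem.List.pyGetD data_list (i + 1) []) RIGHT_CHANNEL 0) none
        soundDimLoop data_list last_i rest (acc ++ [[x, y]])
    else if i = last_i then
      let x := average (PySem.List.pyGetD (PySem.List.pyGetD data_list (last_i - 1) []) LEFT_CHANNEL 0)
                       (PySem.List.pyGetD (PySem.List.pyGetD data_list last_i []) LEFT_CHANNEL 0) none
      let y := average (PySem.List.pyGetD (PySem.List.pyGetD data_list (last_i - 1) []) RIGHT_CHANNEL 0)
                       (PySem.List.pyGetD (PySem.List.pyGetD data_list last_i []) RIGHT_CHANNEL 0) none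
      soundDimLoop data_list last_i rest (acc ++ [[x, y]])
    else
      let x := average (PySem.List.pyGetD (PySem.List.pyGetD data_list (i - 1) []) LEFT_CHANNEL 0)
                       (PySem.List.pyGetD (PySem.List.pyGetD data_list i []) LEFT_CHANNEL 0)
                       (some (PySem.List.pyGetD (PySem.List.pyGetD data_list (i + 1) []) LEFT_CHANNEL 0))
      let y := average (PySem.List.pyGetD (PySem.List.pyGetD data_list (i - 1) []) RIGHT_CHANNEL 0)
                       (PySem.List.pyGetD (PySem.List.pyGetD data_list i []) RIGHT_CHANNEL 0)
                       (some (PySem.List.pyGetD (PySem.List.pyGetD data_list (i + 1) []) RIGHT_CHANNEL 0))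
      soundDimLoop data_list last_i rest (acc ++ [[x, y]])

def sound_dim (data_list : List (List Int)) : List (List Int) :=
  soundDimLoop data_list ((data_list.length : Int) - 1)
    (PySem.List.pyRange 0 (data_list.length : Int) 1) []

-- ===== PORT B =====
-- _trunc_div(s, k) = -((-s) // k) if s < 0 else s // k  (truncation toward zero)
def trunc_div (s k : Int) : Int :=
  if s < 0 then -(PySem.Int.floordiv (-s) k) else PySem.Int.floordiv s k

-- the `for v in col: prefix.append(prefix[-1] + v)` loop, carrying the running
-- last element of the prefix list
def bPrefix (acc : Int) : List Int → List Int
  | [] => [acc]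
  | v :: t => acc :: bPrefix (acc + v) t

-- one iteration of B's `for ch in range(2)` loop body
def smoothChannel (L : List (List Int)) (ch : Int) : List Int :=
  let col := L.map (fun row => PySem.List.pyGetD row ch 0)
  let pfx := bPrefix 0 col
  (PySem.List.pyRange 0 (L.length : Int) 1).map (fun i =>
    let lo := max 0 (i - 1)
    let hi := min (L.length : Int) (i + 2)
    trunc_div (PySem.List.pyGetD pfx hi 0 - PySem.List.pyGetD pfx lo 0) (hi - lo))

def sound_dim_alt (data_list : List (List Int)) : List (List Int) :=
  if data_list.length ≤ 1 then (if data_list = [] then [] else data_list)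
  else
    -- channels = [smoothed ch 0, smoothed ch 1]; zip(*channels) re-assembles rows
    match (PySem.List.pyRange 0 2 1).map (smoothChannel data_list) with
    | [l, r] => (l.zip r).map (fun p => [p.1, p.2])
    | _ => []

-- ===== PRECONDITION & SPEC =====
-- Pre_ excludes inputs with 2 or more rows where some row has fewer than 2 entries:
-- Python A raises IndexError there (every row is subscripted at channels 0 and 1).
def Pre_sound_dim (data_list : List (List Int)) : Prop :=
  data_list.length ≤ 1 ∨ ∀ row ∈ data_list, 2 ≤ row.length
instance (data_list : List (List Int)) : Decidable (Pre_sound_dim data_list) := by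
  unfold Pre_sound_dim; infer_instance
def pvWitness_sound_dim : List (List Int) := [[1, 2], [3, -4], [5, 6]]

def Spec_sound_dim (data_list : List (List Int)) (out : List (List Int)) : Prop := out = sound_dim_alt data_list
instance (data_list : List (List Int)) (out : List (List Int)) : Decidable (Spec_sound_dim data_list out) := by unfold Spec_sound_dim; infer_instance

-- ===== CLAIM (what is proved, stated in full; the proofs are below) =====
def Claim_equal_sound_dim : Prop := ∀ (data_list : List (List Int)), Dom_sound_dim data_list → Pre_sound_dim data_list → Spec_sound_dim data_list (sound_dim data_list)

-- ===== LEMMAS AND PROOFS =====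

-- the cell A's loop appends at index i (for i ≥ 1)
def cellA (L : List (List Int)) (last_i i : Int) : List Int :=
  if i = last_i then
    [average (PySem.List.pyGetD (PySem.List.pyGetD L (last_i - 1) []) 0 0)
             (PySem.List.pyGetD (PySem.List.pyGetD L last_i []) 0 0) none,
     average (PySem.List.pyGetD (PySem.List.pyGetD L (last_i - 1) []) 1 0)
             (PySem.List.pyGetD (PySem.List.pyGetD L last_i []) 1 0) none]
  else
    [average (PySem.List.pyGetD (PySem.List.pyGetD L (i - 1) []) 0 0)
             (PySem.List.pyGetD (PySem.List.pyGetD L i []) 0 0)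
             (some (PySem.List.pyGetD (PySem.List.pyGetD L (i + 1) []) 0 0)),
     average (PySem.List.pyGetD (PySem.List.pyGetD L (i - 1) []) 1 0)
             (PySem.List.pyGetD (PySem.List.pyGetD L i []) 1 0)
             (some (PySem.List.pyGetD (PySem.List.pyGetD L (i + 1) []) 1 0))]

theorem soundDimLoop_map (L : List (List Int)) (last_i : Int) (idxs : List Int)
    (h : ∀ i ∈ idxs, i ≠ 0) (acc : List (List Int)) :
    soundDimLoop L last_i idxs acc = acc ++ idxs.map (cellA L last_i) := by
  induction idxs generalizing acc with
  | nil => simp [soundDimLoop]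
  | cons i rest ih =>
    have hi : i ≠ 0 := h i (by simp)
    have hrest : ∀ j ∈ rest, j ≠ 0 := fun j hj => h j (by simp [hj])
    by_cases hl : i = last_i
    · subst hl; simp [soundDimLoop, hi, ih hrest, cellA, LEFT_CHANNEL, RIGHT_CHANNEL]
    · simp [soundDimLoop, hi, hl, ih hrest, cellA, LEFT_CHANNEL, RIGHT_CHANNEL]

-- A's result for n ≥ 2, as head cell plus the mapped tail
theorem sound_dim_shape (L : List (List Int)) (h2 : 2 ≤ L.length) :
    sound_dim L =
      [average (PySem.List.pyGetD (PySem.List.pyGetD L 0 []) 0 0)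
               (PySem.List.pyGetD (PySem.List.pyGetD L 1 []) 0 0) none,
       average (PySem.List.pyGetD (PySem.List.pyGetD L 0 []) 1 0)
               (PySem.List.pyGetD (PySem.List.pyGetD L 1 []) 1 0) none]
        :: (PySem.List.pyRange 1 (L.length : Int) 1).map (cellA L ((L.length : Int) - 1)) := by
  set n := L.length with hn
  have hcons : PySem.List.pyRange 0 (n : Int) 1 = 0 :: PySem.List.pyRange 1 (n : Int) 1 :=
    PySem.List.pyRange_one_cons (by exact_mod_cast Nat.pos_of_ne_zero (by omega))
  have hne0 : ∀ i ∈ PySem.List.pyRange 1 (n : Int) 1, i ≠ 0 := by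
    intro i hi
    have := (PySem.List.mem_pyRange_one).mp hi
    omega
  have hn1 : ¬ ((0 : Int) = (n : Int) - 1) := by omega
  unfold sound_dim
  rw [← hn, hcons]
  simp only [soundDimLoop, if_neg hn1]
  rw [soundDimLoop_map _ _ _ hne0]
  simp [LEFT_CHANNEL, RIGHT_CHANNEL]

-- B's result for n ≥ 2, as the zip of the two smoothed channels
theorem alt_shape (L : List (List Int)) (h2 : 2 ≤ L.length) :
    sound_dim_alt L =
      ((smoothChannel L 0).zip (smoothChannel L 1)).map (fun p => [p.1, p.2]) := by
  unfold sound_dim_alt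
  rw [if_neg (by omega), show PySem.List.pyRange 0 2 1 = [0, 1] from by decide]
  rfl

theorem bPrefix_length (s : Int) (l : List Int) : (bPrefix s l).length = l.length + 1 := by
  induction l generalizing s with
  | nil => simp [bPrefix]
  | cons v t ih => simp [bPrefix, ih]

theorem bPrefix_getElem (s : Int) (l : List Int) (i : Nat) (h : i ≤ l.length) :
    (bPrefix s l)[i]'(by rw [bPrefix_length]; omega) = s + (l.take i).sum := by
  induction l generalizing s i with
  | nil =>
    have : i = 0 := by simpa using h
    subst this; simp [bPrefix]
  | cons v t ih =>
    cases i with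
    | zero => simp [bPrefix]
    | succ j =>
      have hj : j ≤ t.length := by simpa using h
      simpa [bPrefix, ih (s + v) j hj] using by ring

-- pyGetD on the prefix list at a Nat-cast index, as a take-sum
theorem pfx_get (col : List Int) (m : Nat) (hm : m ≤ col.length) :
    PySem.List.pyGetD (bPrefix 0 col) ((m : Nat) : Int) 0 = (col.take m).sum := by
  rw [PySem.List.pyGetD_natCast]
  rw [List.getD_eq_getElem _ _ (by rw [bPrefix_length]; omega)]
  rw [bPrefix_getElem 0 col m hm]
  ring

theorem length_smoothChannel (L : List (List Int)) (ch : Int) :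
    (smoothChannel L ch).length = L.length := by
  simp [smoothChannel, PySem.List.length_pyRange_one]

theorem trunc_div_eq (s k : Int) (hk : 0 < k) : trunc_div s k = PySem.Int.truncdiv s k := by
  unfold trunc_div PySem.Int.truncdiv PySem.Int.floordiv
  by_cases hs : s < 0
  · rw [if_pos hs, Int.fdiv_eq_ediv, if_pos (Or.inl (by omega)),
        ← Int.tdiv_eq_ediv_of_nonneg (by omega), Int.neg_tdiv]
    ring
  · rw [if_neg hs, Int.fdiv_eq_ediv, if_pos (Or.inl (by omega)),
        ← Int.tdiv_eq_ediv_of_nonneg (by omega)]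
    ring

-- the j-th smoothed value of a channel, in raw window form
theorem smoothChannel_getElem (L : List (List Int)) (ch : Int) (j : Nat) (hj : j < L.length) :
    (smoothChannel L ch)[j]'(by rw [length_smoothChannel]; omega) =
      trunc_div
        (PySem.List.pyGetD (bPrefix 0 (L.map (fun row => PySem.List.pyGetD row ch 0)))
            (min (L.length : Int) ((j : Int) + 2)) 0
          - PySem.List.pyGetD (bPrefix 0 (L.map (fun row => PySem.List.pyGetD row ch 0)))
            (max 0 ((j : Int) - 1)) 0)
        (min (L.length : Int) ((j : Int) + 2) - max 0 ((j : Int) - 1)) := by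
  simp [smoothChannel, PySem.List.getElem_pyRange_one]

theorem take_sum_two (col : List Int) (a : Nat) (h : a + 2 ≤ col.length) :
    (col.take (a + 2)).sum - (col.take a).sum
      = col[a]'(by omega) + col[a + 1]'(by omega) := by
  rw [show a + 2 = (a + 1) + 1 from rfl, List.sum_take_succ col (a + 1) (by omega),
      List.sum_take_succ col a (by omega)]
  ring

theorem take_sum_three (col : List Int) (a : Nat) (h : a + 3 ≤ col.length) :
    (col.take (a + 3)).sum - (col.take a).sum
      = col[a]'(by omega) + col[a + 1]'(by omega) + col[a + 2]'(by omega) := by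
  rw [show a + 3 = ((a + 1) + 1) + 1 from rfl, List.sum_take_succ col ((a + 1) + 1) (by omega),
      List.sum_take_succ col (a + 1) (by omega), List.sum_take_succ col a (by omega)]
  ring

-- the channel column entry, as nested pyGetD at Nat-cast row index
theorem col_getElem (L : List (List Int)) (ch : Int) (k : Nat) (hk : k < L.length) :
    (L.map (fun row => PySem.List.pyGetD row ch 0))[k]'(by simpa using hk)
      = PySem.List.pyGetD (PySem.List.pyGetD L ((k : Nat) : Int) []) ch 0 := by
  rw [List.getElem_map, PySem.List.pyGetD_natCast, List.getD_eq_getElem _ _ hk]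

theorem sound_dim_eq (L : List (List Int)) : sound_dim L = sound_dim_alt L := by
  by_cases h0 : L = []
  · subst h0
    simp [sound_dim, sound_dim_alt, soundDimLoop, PySem.List.pyRange_one_eq_nil]
  by_cases h1 : L.length = 1
  · have hr : PySem.List.pyRange 0 (1 : Int) 1 = [0] := by decide
    simp [sound_dim, sound_dim_alt, soundDimLoop, hr, h1, h0]
  have h2 : 2 ≤ L.length := by
    have := List.length_pos_iff.mpr h0; omega
  rw [sound_dim_shape L h2, alt_shape L h2]
  apply List.ext_getElem
  · simp [length_smoothChannel, PySem.List.length_pyRange_one]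
    omega
  intro j hj1 hj2
  have hjn : j < L.length := by
    simp [length_smoothChannel] at hj2
    omega
  rw [List.getElem_map, List.getElem_zip]
  have key : ∀ ch : Int,
      (smoothChannel L ch)[j]'(by rw [length_smoothChannel]; omega) =
        (if j = 0 then
          average (PySem.List.pyGetD (PySem.List.pyGetD L 0 []) ch 0)
                  (PySem.List.pyGetD (PySem.List.pyGetD L 1 []) ch 0) none
        else if (j : Int) = (L.length : Int) - 1 then
          average (PySem.List.pyGetD (PySem.List.pyGetD L ((L.length : Int) - 1 - 1) []) ch 0)
                  (PySem.List.pyGetD (PySem.List.pyGetD L ((L.length : Int) - 1) []) ch 0) none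
        else
          average (PySem.List.pyGetD (PySem.List.pyGetD L ((j : Int) - 1) []) ch 0)
                  (PySem.List.pyGetD (PySem.List.pyGetD L (j : Int) []) ch 0)
                  (some (PySem.List.pyGetD (PySem.List.pyGetD L ((j : Int) + 1) []) ch 0))) := by
    intro ch
    rw [smoothChannel_getElem L ch j hjn]
    by_cases hj0 : j = 0
    · rw [show min ((L.length : Nat) : Int) ((j : Int) + 2) = ((0 + 2 : Nat) : Int) from by omega,
          show max 0 ((j : Int) - 1) = ((0 : Nat) : Int) from by omega,
          pfx_get (L.map (fun row => PySem.List.pyGetD row ch 0)) (0 + 2)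
            (by simp only [List.length_map]; omega),
          pfx_get (L.map (fun row => PySem.List.pyGetD row ch 0)) 0
            (by simp only [List.length_map]; omega),
          take_sum_two (L.map (fun row => PySem.List.pyGetD row ch 0)) 0
            (by simp only [List.length_map]; omega),
          col_getElem L ch 0 (by omega), col_getElem L ch (0 + 1) (by omega)]
      rw [if_pos hj0]
      simp only [average]
      rw [trunc_div_eq _ _ (by omega)]
      push_cast
      norm_num
    · by_cases hjl : (j : Int) = (L.length : Int) - 1
      · rw [show min ((L.length : Nat) : Int) ((j : Int) + 2) = ((L.length - 2 + 2 : Nat) : Int) from by omega,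
            show max 0 ((j : Int) - 1) = ((L.length - 2 : Nat) : Int) from by omega,
            pfx_get (L.map (fun row => PySem.List.pyGetD row ch 0)) (L.length - 2 + 2)
              (by simp only [List.length_map]; omega),
            pfx_get (L.map (fun row => PySem.List.pyGetD row ch 0)) (L.length - 2)
              (by simp only [List.length_map]; omega),
            take_sum_two (L.map (fun row => PySem.List.pyGetD row ch 0)) (L.length - 2)
              (by simp only [List.length_map]; omega),
            col_getElem L ch (L.length - 2) (by omega),
            col_getElem L ch (L.length - 2 + 1) (by omega)]
        rw [if_neg hj0, if_pos hjl]
        rw [show ((L.length : Nat) : Int) - 1 - 1 = ((L.length - 2 : Nat) : Int) from by omega,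
            show ((L.length : Nat) : Int) - 1 = ((L.length - 2 + 1 : Nat) : Int) from by omega]
        simp only [average]
        rw [trunc_div_eq _ _ (by omega)]
        rw [show ((L.length - 2 + 2 : Nat) : Int) - ((L.length - 2 : Nat) : Int) = 2 from by omega]
      · rw [show min ((L.length : Nat) : Int) ((j : Int) + 2) = ((j - 1 + 3 : Nat) : Int) from by omega,
            show max 0 ((j : Int) - 1) = ((j - 1 : Nat) : Int) from by omega,
            pfx_get (L.map (fun row => PySem.List.pyGetD row ch 0)) (j - 1 + 3)
              (by simp only [List.length_map]; omega),
            pfx_get (L.map (fun row => PySem.List.pyGetD row ch 0)) (j - 1)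
              (by simp only [List.length_map]; omega),
            take_sum_three (L.map (fun row => PySem.List.pyGetD row ch 0)) (j - 1)
              (by simp only [List.length_map]; omega),
            col_getElem L ch (j - 1) (by omega),
            col_getElem L ch (j - 1 + 1) (by omega),
            col_getElem L ch (j - 1 + 2) (by omega)]
        rw [if_neg hj0, if_neg hjl]
        rw [show ((j : Nat) : Int) - 1 = ((j - 1 : Nat) : Int) from by omega,
            show ((j : Nat) : Int) + 1 = ((j - 1 + 2 : Nat) : Int) from by omega,
            show ((j : Nat) : Int) = ((j - 1 + 1 : Nat) : Int) from by omega]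
        simp only [average]
        rw [trunc_div_eq _ _ (by omega)]
        rw [show ((j - 1 + 3 : Nat) : Int) - ((j - 1 : Nat) : Int) = 3 from by omega]
  rw [key 0, key 1]
  cases j with
  | zero =>
    rw [List.getElem_cons_zero, if_pos rfl, if_pos rfl]
  | succ jp =>
    have hne : ¬(jp + 1 = 0) := by omega
    rw [List.getElem_cons_succ, List.getElem_map, PySem.List.getElem_pyRange_one,
        if_neg hne, if_neg hne]
    by_cases hlast : ((jp + 1 : Nat) : Int) = (L.length : Int) - 1
    · rw [if_pos hlast, if_pos hlast, cellA,
          if_pos (show (1 : Int) + jp = (L.length : Int) - 1 from by omega)]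
    · rw [if_neg hlast, if_neg hlast, cellA,
          if_neg (show ¬((1 : Int) + jp = (L.length : Int) - 1) from by omega)]
      push_cast
      ring_nf

-- ===== VERDICT (by name: the statement is the Claim_ definition above) =====
theorem sound_dim_spec : Claim_equal_sound_dim := by
  intro L _ _; unfold Spec_sound_dim; exact sound_dim_eq L
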